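-- pv_equiv track=rewrite | github.com/Markuysa/TestTask | main.py | create_expression
-- ===== SOURCE A (Python) =====
-- operations = ['','+','-']
--
-- def calculate_indexes(length):
--     base = len(operations)
--     result_indexes = ''
--     while length > 0:
--         # calc a new position
--         result_indexes = str(length % base) + result_indexes
--         # decrease the length
--         length //= base
--     return result_indexes
--
-- def create_expression(k):
--     # calculating the operations indexes
--     indexes_list = list(calculate_indexes(k))
--     operation_positions = [''] * 9
--     for i in range(1, 10):
--         temp = i - 1
--         # * -1 to get the number in desc order from the beginning
--         i *= (-1)
--         # if the condition is true => take the operation corresponding to index i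
--         if temp < len(indexes_list):
--             element = int(indexes_list[i])
--             operation_positions[i] = operations[element]
--         # otherwise => set the operation ''
--         else:
--             operation_positions[i] = ''
--     # form the expression
--     result_expression = ''
--     for i in range(9):
--         result_expression += f'{9-i}{operation_positions[i]}'
--     result_expression += '0'
--     return result_expression
-- ===== SOURCE B (Python) =====
-- operations = ['', '+', '-']
--
-- def create_expression(k):
--     ops = [''] * 9
--     pos = 8
--     while k > 0 and pos >= 0:
--         ops[pos] = operations[k % 3]
--         k //= 3
--         pos -= 1
--     return ''.join('%d%s' % (9 - i, ops[i]) for i in range(9)) + '0'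
-- ===== Notes on version B (the rewrite author's own statement) =====
-- stated objective: simpler
-- what changed: B removes the calculate_indexes helper entirely: instead of building a base-3 digit string, listing it, re-parsing each digit char with int() and writing slots via negative indices, it fills the fixed operator slots directly from k's low base-3 digits in one capped countdown loop and joins the result.
import Mathlib
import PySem

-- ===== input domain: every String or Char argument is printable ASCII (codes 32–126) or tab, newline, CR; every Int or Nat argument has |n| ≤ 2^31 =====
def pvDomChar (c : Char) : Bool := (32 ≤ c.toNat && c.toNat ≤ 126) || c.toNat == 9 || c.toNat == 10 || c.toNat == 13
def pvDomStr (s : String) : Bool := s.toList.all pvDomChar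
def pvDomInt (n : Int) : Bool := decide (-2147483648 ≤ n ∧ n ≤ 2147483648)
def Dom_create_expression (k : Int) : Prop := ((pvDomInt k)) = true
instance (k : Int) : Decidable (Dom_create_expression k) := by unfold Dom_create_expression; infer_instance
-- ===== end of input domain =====

-- B drops A's base-3 digit-string helper and the int()-of-char round-trip: one capped countdown
-- loop writes the operator slots directly from k's low base-3 digits (objective: simpler).

-- ===== PORT A =====
def pvOperations : List String := ["", "+", "-"]

def calculate_indexes (length : Int) : String :=
  if h : 0 < length then
    calculate_indexes (PySem.Int.floordiv length 3) ++ PySem.Int.toStr (PySem.Int.mod length 3)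
  else ""
termination_by length.toNat
decreasing_by
  have h3 : PySem.Int.floordiv length 3 = length / 3 :=
    PySem.Int.floordiv_eq_ediv_of_pos (by norm_num)
  rw [h3]; omega

def create_expression (k : Int) : String :=
  let indexes_list : List Char := (calculate_indexes k).toList
  let operation_positions : List String := List.replicate 9 ""
  let ops := (PySem.List.pyRange 1 10 1).foldl (fun ops i =>
      let temp := i - 1
      let i := i * (-1)
      if temp < (indexes_list.length : Int) then
        let element := (PySem.Int.ofStr? (String.ofList [PySem.List.pyGetD indexes_list i ' '])).getD 0
        PySem.List.pySetD ops i (PySem.List.pyGetD pvOperations element "")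
      else
        PySem.List.pySetD ops i "") operation_positions
  ((PySem.List.pyRange 0 9 1).foldl
      (fun acc i => acc ++ PySem.Int.toStr (9 - i) ++ PySem.List.pyGetD ops i "") "") ++ "0"

-- ===== PORT B =====
def altLoop (k : Int) (pos : Int) (ops : List String) : List String :=
  if h : 0 < k ∧ 0 ≤ pos then
    altLoop (PySem.Int.floordiv k 3) (pos - 1)
      (PySem.List.pySetD ops pos (PySem.List.pyGetD pvOperations (PySem.Int.mod k 3) ""))
  else ops
termination_by (pos + 1).toNat
decreasing_by
  obtain ⟨h1, h2⟩ := h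
  omega

def create_expression_alt (k : Int) : String :=
  let ops := altLoop k 8 (List.replicate 9 "")
  String.join ((PySem.List.pyRange 0 9 1).map
      (fun i => PySem.Int.toStr (9 - i) ++ PySem.List.pyGetD ops i "")) ++ "0"

-- ===== PRECONDITION & SPEC =====
def Spec_create_expression (k : Int) (out : String) : Prop := out = create_expression_alt k
instance (k : Int) (out : String) : Decidable (Spec_create_expression k out) := by unfold Spec_create_expression; infer_instance

-- ===== CLAIM (what is proved, stated in full; the proofs are below) =====
def Claim_equal_create_expression : Prop := ∀ (k : Int), Dom_create_expression k → Spec_create_expression k (create_expression k)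

-- ===== LEMMAS AND PROOFS =====

def digChar (d : Int) : Char := Char.ofNat (48 + d.toNat)

theorem calc_pos (k : Int) (h : 0 < k) :
    calculate_indexes k = calculate_indexes (k / 3) ++ PySem.Int.toStr (k % 3) := by
  rw [calculate_indexes, dif_pos h, PySem.Int.floordiv_eq_ediv_of_pos (by norm_num),
    PySem.Int.mod_eq_emod_of_pos (by norm_num)]

theorem calc_nonpos (k : Int) (h : ¬ 0 < k) : calculate_indexes k = "" := by
  rw [calculate_indexes, dif_neg h]

theorem toStr_mod3 (k : Int) : (PySem.Int.toStr (k % 3)).toList = [digChar (k % 3)] := by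
  have h3 : k % 3 = 0 ∨ k % 3 = 1 ∨ k % 3 = 2 := by omega
  rcases h3 with h | h | h <;> rw [h] <;> decide

theorem ci_rev (n : Nat) : ∀ (k : Int), k.toNat = n → 0 < k → ∀ (i : Nat),
    (calculate_indexes k).toList.reverse[i]? =
      if 3 ^ i ≤ k then some (digChar (k / 3 ^ i % 3)) else none := by
  induction n using Nat.strong_induction_on with
  | _ n ih =>
    intro k hn hk i
    rw [calc_pos k hk, String.toList_append, toStr_mod3, List.reverse_append]
    match i with
    | 0 =>
      simp only [List.reverse_cons, List.reverse_nil, List.nil_append, List.singleton_append,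
        List.getElem?_cons_zero]
      rw [if_pos (by omega : (3:Int) ^ 0 ≤ k)]
      norm_num
    | (i+1) =>
      simp only [List.reverse_cons, List.reverse_nil, List.nil_append, List.singleton_append,
        List.getElem?_cons_succ]
      by_cases h3 : 0 < k / 3
      · rw [ih (k / 3).toNat (by omega) (k / 3) rfl h3 i]
        have e1 : k / 3 / 3 ^ i = k / 3 ^ (i + 1) := by
          rw [Int.ediv_ediv_of_nonneg (by norm_num : (0:Int) ≤ 3), ← pow_succ']
        have e2 : ((3:Int) ^ i ≤ k / 3) ↔ ((3:Int) ^ (i + 1) ≤ k) := by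
          rw [Int.le_ediv_iff_mul_le (by norm_num), ← pow_succ]
        rw [e1]
        simp only [e2]
      · rw [calc_nonpos _ h3]
        have hp : ¬ (3:Int) ^ (i+1) ≤ k := by
          have : (3:Int) ^ 1 ≤ 3 ^ (i+1) := pow_le_pow_right₀ (by norm_num) (by omega)
          simp at this; omega
        simp [hp]

def opOf (d : Int) : String := PySem.List.pyGetD pvOperations d ""

theorem ci_len (k : Int) (h : 0 < k) (i : Nat) :
    (i < (calculate_indexes k).toList.length) ↔ 3 ^ i ≤ k := by
  have hrev := ci_rev k.toNat k rfl h i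
  by_cases hc : (3:Int) ^ i ≤ k
  · rw [if_pos hc] at hrev
    have := List.getElem?_eq_some_iff.mp hrev
    simp only [List.length_reverse] at this
    exact ⟨fun _ => hc, fun _ => this.1⟩
  · rw [if_neg hc] at hrev
    have := List.getElem?_eq_none_iff.mp hrev
    simp only [List.length_reverse] at this
    exact ⟨fun hi => absurd hi (by omega), fun hx => absurd hx hc⟩

theorem pySetD_neg {α : Type} (xs : List α) (c : Nat) (v : α) (h1 : 0 < c) (h2 : c ≤ xs.length) :
    PySem.List.pySetD xs (-(c:Int)) v = xs.set (xs.length - c) v := by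
  simp only [PySem.List.pySetD, PySem.List.pySet?, PySem.List.pyIdx?]
  rw [if_neg (by omega), if_pos (by omega)]
  simp

def stepA (L : List Char) (ops : List String) (i : Int) : List String :=
  let temp := i - 1
  let i := i * (-1)
  if temp < (L.length : Int) then
    let element := (PySem.Int.ofStr? (String.ofList [PySem.List.pyGetD L i ' '])).getD 0
    PySem.List.pySetD ops i (PySem.List.pyGetD pvOperations element "")
  else
    PySem.List.pySetD ops i ""

def valA (L : List Char) (j : Nat) : String :=
  if ((8:Int) - j) < (L.length : Int) then
    opOf ((PySem.Int.ofStr? (String.ofList [PySem.List.pyGetD L (-(9 - (j:Int))) ' '])).getD 0)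
  else ""

theorem stepA_eq (L : List Char) (ops : List String) (hlen : ops.length = 9) (q : Nat) (hq : q ≤ 8) :
    stepA L ops (9 - (q:Int)) = ops.set q (valA L q) := by
  unfold stepA valA
  have hidx : (9 - (q:Int) - 1) = (8:Int) - q := by ring
  have hneg : (9 - (q:Int)) * (-1) = -((9 - q : Nat) : Int) := by push_cast [Nat.cast_sub (by omega : q ≤ 9)]; ring
  have hset : ∀ v : String, PySem.List.pySetD ops ((9 - (q:Int)) * (-1)) v = ops.set q v := by
    intro v
    rw [hneg, pySetD_neg ops (9 - q) v (by omega) (by omega)]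
    congr 1; omega
  have hget : -((9 - q : Nat) : Int) = -(9 - (q:Int)) := by push_cast [Nat.cast_sub (by omega : q ≤ 9)]; ring
  simp only [hidx, hset, opOf]
  split
  · rw [hneg, hget]
  · rfl

theorem A_fold_get (L : List Char) : ∀ (m : Nat), m ≤ 9 → ∀ (ops : List String), ops.length = 9 →
    ∀ (j : Nat), j < 9 →
    ((PySem.List.pyRange (10 - (m:Int)) 10 1).foldl (stepA L) ops)[j]? =
      if (j:Int) < m then some (valA L j) else ops[j]? := by
  intro m
  induction m with
  | zero =>
    intro _ ops _ j hj
    rw [PySem.List.pyRange_one_eq_nil (by norm_num)]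
    simp
  | succ q ihq =>
    intro hm ops hlen j hj
    have hcons : PySem.List.pyRange (10 - ((q:Nat)+(1:Nat):Int)) 10 1 =
        (9 - (q:Int)) :: PySem.List.pyRange (10 - (q:Int)) 10 1 := by
      rw [show (10 - ((q:Nat)+(1:Nat):Int)) = 9 - (q:Int) by push_cast; ring,
        PySem.List.pyRange_one_cons (by omega),
        show (9 - (q:Int)) + 1 = 10 - (q:Int) by ring]
    rw [show ((q+1 : Nat) : Int) = (q:Nat) + (1:Nat) by push_cast; ring] at *
    rw [hcons, List.foldl_cons, stepA_eq L ops hlen q (by omega),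
      ihq (by omega) _ (by simpa using hlen) j hj]
    by_cases h1 : (j:Int) < q
    · rw [if_pos h1, if_pos (by omega)]
    · rw [if_neg h1]
      by_cases h2 : j = q
      · subst h2
        rw [List.getElem?_set_self (by omega), if_pos (by omega)]
      · rw [List.getElem?_set_ne (fun hc => h2 hc.symm), if_neg (by omega)]

theorem B_loop_get : ∀ (p : Nat) (k : Int) (ops : List String), p < ops.length →
    ∀ (j : Nat), j < ops.length →
    (altLoop k (p:Int) ops)[j]? =
      if j ≤ p ∧ 0 < k / 3 ^ (p - j) then some (opOf (k / 3 ^ (p - j) % 3)) else ops[j]? := by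
  intro p
  induction p with
  | zero =>
    intro k ops hp j hj
    rw [altLoop]
    by_cases hk : 0 < k
    · rw [dif_pos ⟨hk, by norm_num⟩, altLoop, dif_neg (by push_neg; intro _; norm_num)]
      simp only [PySem.Int.mod_eq_emod_of_pos (by norm_num : (0:Int) < 3)]
      rw [show ((0:Nat):Int) = ((0:Nat):Int) from rfl]
      rw [PySem.List.pySetD_natCast]
      by_cases hj0 : j = 0
      · subst hj0
        rw [List.getElem?_set_self (by omega), if_pos ⟨le_refl 0, by simpa using hk⟩]
        simp [opOf]
      · rw [List.getElem?_set_ne (fun hc => hj0 hc.symm), if_neg (by omega)]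
    · rw [dif_neg (fun hc => hk hc.1)]
      rw [if_neg]
      rintro ⟨-, hpos⟩
      have h0 : k / 3 ^ (0 - j) ≤ 0 := by
        have := Int.ediv_le_ediv (a := k) (b := 0) (by positivity : (0:Int) < 3 ^ (0 - j)) (by omega)
        simpa using this
      omega
  | succ q ihq =>
    intro k ops hp j hj
    rw [altLoop]
    by_cases hk : 0 < k
    · rw [dif_pos ⟨hk, by positivity⟩,
        PySem.Int.floordiv_eq_ediv_of_pos (by norm_num : (0:Int) < 3),
        PySem.Int.mod_eq_emod_of_pos (by norm_num : (0:Int) < 3),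
        show ((q+1:Nat):Int) - 1 = (q:Int) by push_cast; ring,
        PySem.List.pySetD_natCast]
      rw [ihq (k / 3) _ (by simp; omega) j (by simp; omega)]
      by_cases h1 : j ≤ q
      · have e1 : k / 3 / 3 ^ (q - j) = k / 3 ^ (q + 1 - j) := by
          rw [Int.ediv_ediv_of_nonneg (by norm_num : (0:Int) ≤ 3), ← pow_succ']
          congr 2
          omega
        rw [e1]
        by_cases h2 : 0 < k / 3 ^ (q + 1 - j)
        · rw [if_pos ⟨h1, h2⟩, if_pos ⟨by omega, h2⟩]
        · rw [if_neg (fun hc => h2 hc.2), if_neg (fun hc => h2 hc.2),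
            List.getElem?_set_ne (i := q + 1) (j := j) (show q + 1 ≠ j by omega)]
      · by_cases hjq : j = q + 1
        · subst hjq
          rw [if_neg (by omega), List.getElem?_set_self (by omega),
            if_pos ⟨le_refl _, by simpa using hk⟩]
          simp [opOf]
        · rw [if_neg (by omega), List.getElem?_set_ne (i := q + 1) (j := j) (by omega),
            if_neg (by omega)]
    · rw [dif_neg (fun hc => hk hc.1), if_neg]
      rintro ⟨-, hpos⟩
      have h0 : k / 3 ^ (q + 1 - j) ≤ 0 := by
        have := Int.ediv_le_ediv (a := k) (b := 0) (by positivity : (0:Int) < 3 ^ (q + 1 - j)) (by omega)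
        simpa using this
      omega

theorem ofStr_digChar (d : Int) (h0 : 0 ≤ d) (h3 : d < 3) :
    (PySem.Int.ofStr? (String.ofList [digChar d])).getD 0 = d := by
  have : d = 0 ∨ d = 1 ∨ d = 2 := by omega
  rcases this with h | h | h <;> rw [h] <;> decide

theorem valA_eq (k : Int) (hk : 0 < k) (j : Nat) (hj : j < 9) :
    valA ((calculate_indexes k).toList) j =
      if 3 ^ (8 - j) ≤ k then opOf (k / 3 ^ (8 - j) % 3) else "" := by
  set L := (calculate_indexes k).toList with hL
  have hcond : (((8:Int) - j) < (L.length : Int)) ↔ 3 ^ (8 - j) ≤ k := by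
    rw [show ((8:Int) - j) = ((8 - j : Nat) : Int) by push_cast [Nat.cast_sub (by omega : j ≤ 8)]; ring]
    rw [Nat.cast_lt]
    exact ci_len k hk (8 - j)
  unfold valA
  by_cases hc : (3:Int) ^ (8 - j) ≤ k
  · rw [if_pos (hcond.mpr hc), if_pos hc]
    have hlen : 8 - j < L.length := (ci_len k hk (8 - j)).mpr hc
    have hrev := ci_rev k.toNat k rfl hk (8 - j)
    rw [if_pos hc] at hrev
    rw [List.getElem?_reverse (by simpa using hlen)] at hrev
    have hgetE : L[L.length - (9 - j)]? = some (digChar (k / 3 ^ (8 - j) % 3)) := by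
      rw [show L.length - (9 - j) = L.length - 1 - (8 - j) by omega]
      exact hrev
    have hget : PySem.List.pyGetD L (-(9 - (j:Int))) ' ' = digChar (k / 3 ^ (8 - j) % 3) := by
      rw [show (-(9 - (j:Int))) = -(((9 - j : Nat)) : Int) by push_cast [Nat.cast_sub (by omega : j ≤ 9)]; ring]
      rw [PySem.List.pyGetD_neg_natCast L (9 - j) ' ' (by omega) (by omega)]
      have := List.getElem?_eq_some_iff.mp hgetE
      exact this.2
    rw [hget, ofStr_digChar _ (Int.emod_nonneg _ (by norm_num)) (Int.emod_lt_of_pos _ (by norm_num))]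
  · rw [if_neg (fun hx => hc (hcond.mp hx)), if_neg hc]

theorem stepA_len (L : List Char) (ops : List String) (i : Int) :
    (stepA L ops i).length = ops.length := by
  simp only [stepA]
  split <;> rw [PySem.List.length_pySetD]

theorem foldA_len (L : List Char) : ∀ (l : List Int) (ops : List String),
    (l.foldl (stepA L) ops).length = ops.length := by
  intro l
  induction l with
  | nil => intro ops; rfl
  | cons a l ih => intro ops; rw [List.foldl_cons, ih, stepA_len]

theorem altLoop_len (k pos : Int) (ops : List String) :
    (altLoop k pos ops).length = ops.length := by
  induction k, pos, ops using altLoop.induct with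
  | case1 k pos ops h ih =>
    rw [altLoop, dif_pos h, ih, PySem.List.length_pySetD]
  | case2 k pos ops h => rw [altLoop, dif_neg h]

theorem join_shift : ∀ (l : List String) (init : String),
    l.foldl (fun r s => r ++ s) init = init ++ String.join l := by
  intro l
  induction l with
  | nil => intro init; simp [String.join]
  | cons a l ih =>
    intro init
    rw [List.foldl_cons, ih]
    have : String.join (a :: l) = a ++ String.join l := by
      show (a :: l).foldl (fun r s => r ++ s) "" = _
      rw [List.foldl_cons, ih, String.empty_append]
    rw [this, String.append_assoc]

theorem assembleA (ops : List String) : ∀ (l : List Int) (init : String),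
    l.foldl (fun acc i => acc ++ PySem.Int.toStr (9 - i) ++ PySem.List.pyGetD ops i "") init =
      init ++ String.join (l.map (fun i => PySem.Int.toStr (9 - i) ++ PySem.List.pyGetD ops i "")) := by
  intro l
  induction l with
  | nil => intro init; simp [String.join]
  | cons a l ih =>
    intro init
    rw [List.foldl_cons, ih, List.map_cons]
    have : String.join ((PySem.Int.toStr (9 - a) ++ PySem.List.pyGetD ops a "") ::
        l.map (fun i => PySem.Int.toStr (9 - i) ++ PySem.List.pyGetD ops i "")) =
        (PySem.Int.toStr (9 - a) ++ PySem.List.pyGetD ops a "") ++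
          String.join (l.map (fun i => PySem.Int.toStr (9 - i) ++ PySem.List.pyGetD ops i "")) := by
      show List.foldl _ "" _ = _
      rw [List.foldl_cons, join_shift, String.empty_append]
    rw [this, ← String.append_assoc, ← String.append_assoc]

theorem ops_eq (k : Int) (hk : 0 < k) :
    (PySem.List.pyRange 1 10 1).foldl (stepA ((calculate_indexes k).toList)) (List.replicate 9 "") =
      altLoop k 8 (List.replicate 9 "") := by
  apply List.ext_getElem?
  intro j
  have hlenA : ((PySem.List.pyRange 1 10 1).foldl (stepA ((calculate_indexes k).toList))
      (List.replicate 9 "")).length = 9 := by rw [foldA_len]; simp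
  have hlenB : (altLoop k 8 (List.replicate 9 "")).length = 9 := by rw [altLoop_len]; simp
  by_cases hj : j < 9
  · have hA := A_fold_get ((calculate_indexes k).toList) 9 (le_refl 9)
      (List.replicate 9 "") (by simp) j hj
    rw [show ((10:Int) - ((9:Nat):Int)) = 1 by norm_num] at hA
    rw [hA, if_pos (by omega)]
    have hB := B_loop_get 8 k (List.replicate 9 "") (by simp) j (by simp; omega)
    rw [show (((8:Nat)):Int) = (8:Int) by norm_num] at hB
    rw [hB]
    rw [valA_eq k hk j hj]
    have hbr : (0 < k / 3 ^ (8 - j)) ↔ 3 ^ (8 - j) ≤ k := by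
      rw [show (0:Int) < k / 3 ^ (8-j) ↔ 1 ≤ k / 3 ^ (8-j) by omega,
        Int.le_ediv_iff_mul_le (by positivity), one_mul]
    by_cases hc : (3:Int) ^ (8 - j) ≤ k
    · rw [if_pos hc, if_pos ⟨by omega, hbr.mpr hc⟩]
    · rw [if_neg hc, if_neg (fun hx => hc (hbr.mp hx.2))]
      rw [List.getElem?_replicate, if_pos hj]
  · rw [List.getElem?_eq_none_iff.mpr (by omega), List.getElem?_eq_none_iff.mpr (by omega)]

theorem main_eq (k : Int) : create_expression k = create_expression_alt k := by
  by_cases hk : 0 < k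
  · show ((PySem.List.pyRange 0 9 1).foldl
        (fun acc i => acc ++ PySem.Int.toStr (9 - i) ++ PySem.List.pyGetD
          ((PySem.List.pyRange 1 10 1).foldl (stepA ((calculate_indexes k).toList))
            (List.replicate 9 "")) i "") "") ++ "0" = _
    rw [ops_eq k hk]
    show _ = String.join ((PySem.List.pyRange 0 9 1).map
        (fun i => PySem.Int.toStr (9 - i) ++ PySem.List.pyGetD (altLoop k 8 (List.replicate 9 "")) i "")) ++ "0"
    rw [assembleA, String.empty_append]
  · have hB : altLoop k 8 (List.replicate 9 "") = List.replicate 9 "" := by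
      rw [altLoop, dif_neg (fun hc => hk hc.1)]
    show ((PySem.List.pyRange 0 9 1).foldl
        (fun acc i => acc ++ PySem.Int.toStr (9 - i) ++ PySem.List.pyGetD
          ((PySem.List.pyRange 1 10 1).foldl (stepA ((calculate_indexes k).toList))
            (List.replicate 9 "")) i "") "") ++ "0" = _
    show _ = String.join ((PySem.List.pyRange 0 9 1).map
        (fun i => PySem.Int.toStr (9 - i) ++ PySem.List.pyGetD (altLoop k 8 (List.replicate 9 "")) i "")) ++ "0"
    rw [calc_nonpos k hk, hB]
    decide

-- ===== VERDICT (by name: the statement is the Claim_ definition above) =====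
theorem create_expression_spec : Claim_equal_create_expression := by
  intro k _
  unfold Spec_create_expression
  exact main_eq k
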